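-- pv_equiv track=rewrite | github.com/cstoner/advent-of-code-2019 | day12/day12b.py | calc_acc
-- ===== SOURCE A (Python) =====
-- from typing import List
--
-- def calc_acc(pos: List[int]):
--     acc = [0 for _ in pos]
--     for i in range(len(pos)):
--         for j in range(i, len(pos)):
--             if pos[i] > pos[j]:
--                 acc[i] -= 1
--                 acc[j] += 1
--             elif pos[i] < pos[j]:
--                 acc[i] += 1
--                 acc[j] -= 1
--     return acc
-- ===== SOURCE B (Python) =====
-- from typing import List
--
-- def calc_acc(pos: List[int]):
--     # For each body, gravity is (#bodies strictly greater) - (#bodies strictly less).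
--     return [sum(1 for y in pos if y > x) - sum(1 for y in pos if y < x) for x in pos]
-- ===== Notes on version B (the rewrite author's own statement) =====
-- stated objective: simpler
-- what changed: replaces the in-place symmetric pairwise-update double loop by a direct per-element count (#greater - #less) over the list, with no mutation and no index arithmetic
import Mathlib
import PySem

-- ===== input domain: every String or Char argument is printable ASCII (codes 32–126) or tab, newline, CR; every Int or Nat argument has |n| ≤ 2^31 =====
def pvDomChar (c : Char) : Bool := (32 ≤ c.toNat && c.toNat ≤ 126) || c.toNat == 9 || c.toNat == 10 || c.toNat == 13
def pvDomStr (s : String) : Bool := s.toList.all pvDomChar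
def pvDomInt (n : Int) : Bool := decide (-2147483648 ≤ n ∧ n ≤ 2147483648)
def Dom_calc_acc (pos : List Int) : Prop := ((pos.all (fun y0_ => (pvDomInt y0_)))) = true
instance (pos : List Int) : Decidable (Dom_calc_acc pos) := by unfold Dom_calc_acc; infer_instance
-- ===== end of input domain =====

-- B replaces A's in-place symmetric pairwise-update double loop by a direct
-- per-element count (#greater − #less); same quadratic cost, simpler code.


-- ===== PORT A =====
-- one pass of A's inner loop body (the if/elif, two in-place updates per branch)
def pvStep (pos : List Int) (i j : Int) (acc : List Int) : List Int :=
  let pi_ := PySem.List.pyGetD pos i 0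
  let pj_ := PySem.List.pyGetD pos j 0
  if pj_ < pi_ then
    -- acc[i] -= 1; acc[j] += 1
    let acc1 := PySem.List.pySetD acc i (PySem.List.pyGetD acc i 0 - 1)
    PySem.List.pySetD acc1 j (PySem.List.pyGetD acc1 j 0 + 1)
  else if pi_ < pj_ then
    -- acc[i] += 1; acc[j] -= 1
    let acc1 := PySem.List.pySetD acc i (PySem.List.pyGetD acc i 0 + 1)
    PySem.List.pySetD acc1 j (PySem.List.pyGetD acc1 j 0 - 1)
  else acc

def calc_acc (pos : List Int) : List Int :=
  let acc0 : List Int := pos.map (fun _ => (0 : Int))   -- [0 for _ in pos]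
  (PySem.List.pyRange 0 (pos.length : Int) 1).foldl (fun acc i =>
    (PySem.List.pyRange i (pos.length : Int) 1).foldl (fun acc j =>
      pvStep pos i j acc) acc) acc0

-- ===== PORT B =====
def calc_acc_alt (pos : List Int) : List Int :=
  pos.map (fun x =>
    (pos.foldl (fun s y => if x < y then s + 1 else s) (0 : Int))
      - (pos.foldl (fun s y => if y < x then s + 1 else s) (0 : Int)))

-- ===== PRECONDITION & SPEC =====
def Spec_calc_acc (pos : List Int) (out : List Int) : Prop := out = calc_acc_alt pos
instance (pos : List Int) (out : List Int) : Decidable (Spec_calc_acc pos out) := by unfold Spec_calc_acc; infer_instance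

-- ===== CLAIM (what is proved, stated in full; the proofs are below) =====
def Claim_equal_calc_acc : Prop := ∀ (pos : List Int), Dom_calc_acc pos → Spec_calc_acc pos (calc_acc pos)

-- ===== LEMMAS AND PROOFS =====

-- the signed pull of a body with value b on a body with value a
def pvSg (a b : Int) : Int := if b < a then 1 else if a < b then -1 else 0

-- net contribution of A's step (i, j) to cell m
def pvContrib (pos : List Int) (i j m : Int) : Int :=
  (if m = i then pvSg (PySem.List.pyGetD pos j 0) (PySem.List.pyGetD pos i 0) else 0)
    + (if m = j then pvSg (PySem.List.pyGetD pos i 0) (PySem.List.pyGetD pos j 0) else 0)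

lemma pvSg_self (a : Int) : pvSg a a = 0 := by simp [pvSg]

lemma pvStep_length (pos : List Int) (i j : Int) (acc : List Int) :
    (pvStep pos i j acc).length = acc.length := by
  by_cases h1 : PySem.List.pyGetD pos j 0 < PySem.List.pyGetD pos i 0 <;>
    by_cases h2 : PySem.List.pyGetD pos i 0 < PySem.List.pyGetD pos j 0 <;>
      simp [pvStep, h1, h2, PySem.List.length_pySetD]

lemma pvStep_get (pos : List Int) (i j : Int) (acc : List Int)
    (hi : 0 ≤ i ∧ i < (acc.length : Int)) (hj : 0 ≤ j ∧ j < (acc.length : Int))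
    (m : Int) (hm : 0 ≤ m) :
    PySem.List.pyGetD (pvStep pos i j acc) m 0
      = PySem.List.pyGetD acc m 0 + pvContrib pos i j m := by
  obtain ⟨a, rfl⟩ : ∃ a : Nat, i = (a : Int) := ⟨i.toNat, (Int.toNat_of_nonneg hi.1).symm⟩
  obtain ⟨b, rfl⟩ : ∃ b : Nat, j = (b : Int) := ⟨j.toNat, (Int.toNat_of_nonneg hj.1).symm⟩
  obtain ⟨c, rfl⟩ : ∃ c : Nat, m = (c : Int) := ⟨m.toNat, (Int.toNat_of_nonneg hm).symm⟩
  have ha : a < acc.length := by exact_mod_cast hi.2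
  have hb : b < acc.length := by exact_mod_cast hj.2
  by_cases hca : c = a
  · rcases hca with rfl
    by_cases hcb : c = b
    · rcases hcb with rfl
      unfold pvStep pvContrib pvSg
      dsimp only
      simp [ha]
    · have h4 : ¬ b = c := fun h => hcb h.symm
      unfold pvStep pvContrib pvSg
      dsimp only
      split_ifs <;> simp_all <;> omega
  · by_cases hcb : c = b
    · rcases hcb with rfl
      have h3 : ¬ a = c := fun h => hca h.symm
      unfold pvStep pvContrib pvSg
      dsimp only
      split_ifs <;> simp_all
      omega
    · have h3 : ¬ a = c := fun h => hca h.symm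
      have h4 : ¬ b = c := fun h => hcb h.symm
      unfold pvStep pvContrib pvSg
      dsimp only
      split_ifs <;> simp_all
lemma pvInner_length (pos : List Int) (i : Int) (js : List Int) (acc : List Int) :
    (js.foldl (fun acc j => pvStep pos i j acc) acc).length = acc.length := by
  induction js generalizing acc with
  | nil => rfl
  | cons j js ih => simp [List.foldl_cons, ih, pvStep_length]

lemma pvInner_get (pos : List Int) (i : Int) (js : List Int) (acc : List Int)
    (hi : 0 ≤ i ∧ i < (acc.length : Int))
    (hjs : ∀ j ∈ js, 0 ≤ j ∧ j < (acc.length : Int)) (m : Int) (hm : 0 ≤ m) :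
    PySem.List.pyGetD (js.foldl (fun acc j => pvStep pos i j acc) acc) m 0
      = PySem.List.pyGetD acc m 0 + (js.map (fun j => pvContrib pos i j m)).sum := by
  induction js generalizing acc with
  | nil => simp
  | cons j js ih =>
    have hlen := pvStep_length pos i j acc
    have h1 : ∀ x ∈ js, 0 ≤ x ∧ x < ((pvStep pos i j acc).length : Int) := by
      intro x hx; rw [hlen]; exact hjs x (List.mem_cons_of_mem _ hx)
    have hi' : 0 ≤ i ∧ i < ((pvStep pos i j acc).length : Int) := by rw [hlen]; exact hi
    simp only [List.foldl_cons, List.map_cons, List.sum_cons]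
    rw [ih _ hi' h1, pvStep_get pos i j acc hi (hjs j List.mem_cons_self) m hm]
    ring

lemma pvOuter_length (pos : List Int) (is_ : List Int) (acc : List Int) :
    (is_.foldl (fun acc i =>
      (PySem.List.pyRange i (pos.length : Int) 1).foldl (fun acc j => pvStep pos i j acc) acc) acc).length
      = acc.length := by
  induction is_ generalizing acc with
  | nil => rfl
  | cons i is_ ih => simp [List.foldl_cons, ih, pvInner_length]

lemma pvOuter_get (pos : List Int) (is_ : List Int) (acc : List Int)
    (his : ∀ i ∈ is_, 0 ≤ i ∧ i < (acc.length : Int))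
    (hlen : acc.length = pos.length) (m : Int) (hm : 0 ≤ m) :
    PySem.List.pyGetD
      (is_.foldl (fun acc i =>
        (PySem.List.pyRange i (pos.length : Int) 1).foldl (fun acc j => pvStep pos i j acc) acc) acc) m 0
      = PySem.List.pyGetD acc m 0
        + (is_.map (fun i =>
            ((PySem.List.pyRange i (pos.length : Int) 1).map (fun j => pvContrib pos i j m)).sum)).sum := by
  induction is_ generalizing acc with
  | nil => simp
  | cons i is_ ih =>
    have hi := his i List.mem_cons_self
    have hinlen := pvInner_length pos i (PySem.List.pyRange i (pos.length : Int) 1) acc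
    have h1 : ∀ x ∈ is_, 0 ≤ x ∧ x <
        (((PySem.List.pyRange i (pos.length : Int) 1).foldl (fun acc j => pvStep pos i j acc) acc).length : Int) := by
      intro x hx; rw [hinlen]; exact his x (List.mem_cons_of_mem _ hx)
    have hjs : ∀ j ∈ PySem.List.pyRange i (pos.length : Int) 1, 0 ≤ j ∧ j < (acc.length : Int) := by
      intro j hj
      rw [PySem.List.mem_pyRange_one] at hj
      refine ⟨le_trans hi.1 hj.1, ?_⟩
      rw [hlen] at *
      omega
    simp only [List.foldl_cons, List.map_cons, List.sum_cons]
    rw [ih _ h1 (by rw [hinlen]; exact hlen),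
        pvInner_get pos i (PySem.List.pyRange i (pos.length : Int) 1) acc hi hjs m hm]
    ring

-- Σ_{j∈L} (if m = j then c j else 0) = if m ∈ L then c m else 0, for L without duplicates
lemma pvSum_ite_mem (L : List Int) (hL : L.Nodup) (m : Int) (c : Int → Int) :
    (L.map (fun j => if m = j then c j else 0)).sum = if m ∈ L then c m else 0 := by
  induction L with
  | nil => simp
  | cons a L ih =>
    simp only [List.map_cons, List.sum_cons, List.nodup_cons] at *
    rw [ih hL.2]
    by_cases hma : m = a
    · subst hma
      simp [hL.1]
    · simp [hma]

lemma pvSum_sg (pos : List Int) (c : Int) :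
    (pos.map (fun y => pvSg y c)).sum
      = ((pos.countP (fun y => decide (c < y)) : Int) - (pos.countP (fun y => decide (y < c)) : Int)) := by
  induction pos with
  | nil => simp
  | cons a pos ih =>
    rw [List.map_cons, List.sum_cons, ih, List.countP_cons, List.countP_cons]
    unfold pvSg
    by_cases h1 : c < a
    · simp [h1, not_lt.mpr (le_of_lt h1)]
      ring
    · by_cases h2 : a < c
      · simp [h1, h2]
        ring
      · simp [h1, h2]

-- the double sum of A's contributions at an in-range cell m collapses to Σ_y pvSg y pos[m]
lemma pvDoubleSum (pos : List Int) (m : Int) (hm : 0 ≤ m ∧ m < (pos.length : Int)) :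
    ((PySem.List.pyRange 0 (pos.length : Int) 1).map (fun i =>
        ((PySem.List.pyRange i (pos.length : Int) 1).map (fun j => pvContrib pos i j m)).sum)).sum
      = (pos.map (fun y => pvSg y (PySem.List.pyGetD pos m 0))).sum := by
  have hinner : ∀ i : Int,
      ((PySem.List.pyRange i (pos.length : Int) 1).map (fun j => pvContrib pos i j m)).sum
        = (if m = i then
            ((PySem.List.pyRange i (pos.length : Int) 1).map
              (fun j => pvSg (PySem.List.pyGetD pos j 0) (PySem.List.pyGetD pos i 0))).sum else 0)
          + (if i ≤ m then pvSg (PySem.List.pyGetD pos i 0) (PySem.List.pyGetD pos m 0) else 0) := by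
    intro i
    unfold pvContrib
    rw [PySem.List.sum_map_add_int]
    congr 1
    · by_cases hmi : m = i
      · simp [hmi]
      · simp [hmi]
    · rw [pvSum_ite_mem _ (PySem.List.nodup_pyRange_one _ _) m _]
      by_cases him : i ≤ m
      · rw [if_pos (PySem.List.mem_pyRange_one.mpr ⟨him, hm.2⟩), if_pos him]
      · rw [if_neg (fun h => him (PySem.List.mem_pyRange_one.mp h).1), if_neg him]
  rw [List.map_congr_left (fun i _ => hinner i), PySem.List.sum_map_add_int]
  -- first summand: only i = m survives
  rw [pvSum_ite_mem _ (PySem.List.nodup_pyRange_one _ _) m _,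
      if_pos (PySem.List.mem_pyRange_one.mpr ⟨hm.1, hm.2⟩)]
  -- Σ_{j∈[m,n)} = pvSg pos[m] pos[m] + Σ_{j∈[m+1,n)} and the head term is 0
  rw [PySem.List.pyRange_one_cons hm.2, List.map_cons, List.sum_cons, pvSg_self]
  -- second summand: split the range at m+1
  rw [PySem.List.pyRange_one_append 0 (m + 1) (pos.length : Int) (by omega) (by omega),
      List.map_append, List.sum_append]
  have hlow : ((PySem.List.pyRange 0 (m + 1) 1).map
      (fun i => if i ≤ m then pvSg (PySem.List.pyGetD pos i 0) (PySem.List.pyGetD pos m 0) else 0)).sum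
      = ((PySem.List.pyRange 0 (m + 1) 1).map
          (fun i => pvSg (PySem.List.pyGetD pos i 0) (PySem.List.pyGetD pos m 0))).sum := by
    refine congrArg List.sum (List.map_congr_left ?_)
    intro i hi
    rw [if_pos (by have := PySem.List.mem_pyRange_one.mp hi; omega)]
  have hhigh : ((PySem.List.pyRange (m + 1) (pos.length : Int) 1).map
      (fun i => if i ≤ m then pvSg (PySem.List.pyGetD pos i 0) (PySem.List.pyGetD pos m 0) else 0)).sum
      = 0 := by
    rw [List.map_congr_left (g := fun _ => (0 : Int)) ?_]
    · simp
    · intro i hi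
      rw [if_neg (by have := PySem.List.mem_pyRange_one.mp hi; omega)]
  rw [hlow, hhigh]
  -- reassemble Σ_{[0,m+1)} + Σ_{[m+1,n)} = Σ_{[0,n)}
  rw [show ∀ x y : Int, 0 + x + (y + 0) = y + x from by intros; ring]
  rw [← List.sum_append, ← List.map_append,
      ← PySem.List.pyRange_one_append 0 (m + 1) (pos.length : Int) (by omega) (by omega)]
  -- and Σ_{j∈[0,n)} pvSg pos[j] pos[m] = Σ_{y∈pos} pvSg y pos[m]
  have : ((PySem.List.pyRange 0 (pos.length : Int) 1).map
      (fun j => pvSg (PySem.List.pyGetD pos j 0) (PySem.List.pyGetD pos m 0))).sum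
      = (((PySem.List.pyRange 0 (pos.length : Int) 1).map (fun j => PySem.List.pyGetD pos j 0)).map
          (fun y => pvSg y (PySem.List.pyGetD pos m 0))).sum := by
    rw [List.map_map]
    rfl
  rw [this]
  have hmr := PySem.List.map_pyGetD_pyRange_zero pos 0
  simp only [PySem.List.len_eq] at hmr
  rw [hmr]

lemma pvB_eq_map (pos : List Int) :
    calc_acc_alt pos = pos.map (fun x =>
      ((pos.countP (fun y => decide (x < y)) : Int) - (pos.countP (fun y => decide (y < x)) : Int))) := by
  unfold calc_acc_alt
  refine List.map_congr_left ?_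
  intro x _
  rw [PySem.List.foldl_ite_add_one, PySem.List.foldl_ite_add_one]
  ring

-- ===== VERDICT (by name: the statement is the Claim_ definition above) =====
theorem calc_acc_spec : Claim_equal_calc_acc := by
  intro pos _
  unfold Spec_calc_acc
  rw [pvB_eq_map]
  unfold calc_acc
  apply List.ext_getElem
  · simp [pvOuter_length]
  · intro k hk1 hk2
    have hk : k < pos.length := by
      simpa [pvOuter_length] using hk1
    have hA : ((PySem.List.pyRange 0 (pos.length : Int) 1).foldl (fun acc i =>
        (PySem.List.pyRange i (pos.length : Int) 1).foldl (fun acc j =>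
          pvStep pos i j acc) acc) (pos.map (fun _ => (0 : Int))))[k]'hk1
        = PySem.List.pyGetD ((PySem.List.pyRange 0 (pos.length : Int) 1).foldl (fun acc i =>
            (PySem.List.pyRange i (pos.length : Int) 1).foldl (fun acc j =>
              pvStep pos i j acc) acc) (pos.map (fun _ => (0 : Int)))) (k : Int) 0 := by
      rw [PySem.List.pyGetD_natCast, List.getD_eq_getElem _ _ hk1]
    rw [hA, pvOuter_get pos _ _ ?his (by simp) (k : Int) (by positivity)]
    · have hacc0 : PySem.List.pyGetD (pos.map (fun _ => (0 : Int))) (k : Int) 0 = 0 := by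
        rw [PySem.List.pyGetD_natCast,
            List.getD_eq_getElem _ _ (show k < (pos.map (fun _ => (0 : Int))).length by simpa using hk)]
        simp
      rw [hacc0, pvDoubleSum pos (k : Int) ⟨by positivity, by exact_mod_cast hk⟩, pvSum_sg]
      have hPk : PySem.List.pyGetD pos (k : Int) 0 = pos[k] := by
        rw [PySem.List.pyGetD_natCast, List.getD_eq_getElem _ _ hk]
      rw [hPk, List.getElem_map]
      ring
    · intro i hi
      have := PySem.List.mem_pyRange_one.mp hi
      constructor
      · exact this.1
      · simp only [List.length_map]
        exact this.2
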